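-- pv_equiv track=rewrite | github.com/ananyahjha93/libself | ssl_framework/models/trunks/utils.py | parse_out_keys_arg
-- ===== SOURCE A (Python) =====
-- def parse_out_keys_arg(out_feat_keys, all_feat_names):
--     """
--     Checks if all out_feature_keys are mapped to a layer in the model.
--     Ensures no duplicate features are requested.
--     Returns the last layer to forward pass through for efficiency.
--     Adapted from (https://github.com/gidariss/FeatureLearningRotNet)
--     """
--
--     # if len(out_feat_keys) == 0, then None
--     if out_feat_keys is not None and len(out_feat_keys) == 0:
--         out_feat_keys = None
--
--     # By default return the features of the last layer / module.
--     out_feat_keys = [all_feat_names[-1]] if out_feat_keys is None else out_feat_keys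
--
--     for f, key in enumerate(out_feat_keys):
--         if key not in all_feat_names:
--             raise ValueError(
--                 "Feature with name {0} does not exist. Existing features: {1}.".format(
--                     key, all_feat_names
--                 )
--             )
--         elif key in out_feat_keys[:f]:
--             raise ValueError("Duplicate output feature key: {0}.".format(key))
--
--     # Find the highest output feature in `out_feat_keys
--     max_out_feat = max(all_feat_names.index(key) for key in out_feat_keys)
--
--     return out_feat_keys, max_out_feat
-- ===== SOURCE B (Python) =====
-- def parse_out_keys_arg(out_feat_keys, all_feat_names):
--     """
--     Same contract as A, computed the other way round: instead of scanning
--     all_feat_names once per key (membership, then .index inside max()), walk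
--     the layer list ONCE front to back, discarding each layer name from the
--     set of pending requests; the index at which the set empties is exactly
--     the highest layer needed.  Validation is a set-size comparison (dups)
--     and the leftover pending set (missing keys), pinpointed only on failure.
--     """
--     if not out_feat_keys:
--         out_feat_keys = [all_feat_names[-1]]
--
--     # distinct requested keys still to be located among the layers
--     remaining = set(out_feat_keys)
--     if len(remaining) != len(out_feat_keys):
--         seen = set()
--         for key in out_feat_keys:
--             if key in seen:
--                 raise ValueError("Duplicate output feature key: {0}.".format(key))
--             seen.add(key)
--
--     max_out_feat = -1
--     for i, name in enumerate(all_feat_names):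
--         remaining.discard(name)
--         if not remaining:
--             max_out_feat = i
--             break
--     if remaining:
--         key = next(k for k in out_feat_keys if k in remaining)
--         raise ValueError(
--             "Feature with name {0} does not exist. Existing features: {1}.".format(
--                 key, all_feat_names
--             )
--         )
--     return out_feat_keys, max_out_feat
-- ===== Notes on version B (the rewrite author's own statement) =====
-- stated objective: alternative
-- what changed: B inverts the traversal: instead of A's per-key scans of all_feat_names (membership test per key, then max() over all_feat_names.index(key)), B makes one forward walk over all_feat_names discarding each layer name from the set of pending requested keys and stops at the index where the set empties, which is exactly the highest needed layer; duplicates are detected by a set-size comparison and missing keys by the leftover pending set, pinpointed only on failure.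
import Mathlib
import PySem

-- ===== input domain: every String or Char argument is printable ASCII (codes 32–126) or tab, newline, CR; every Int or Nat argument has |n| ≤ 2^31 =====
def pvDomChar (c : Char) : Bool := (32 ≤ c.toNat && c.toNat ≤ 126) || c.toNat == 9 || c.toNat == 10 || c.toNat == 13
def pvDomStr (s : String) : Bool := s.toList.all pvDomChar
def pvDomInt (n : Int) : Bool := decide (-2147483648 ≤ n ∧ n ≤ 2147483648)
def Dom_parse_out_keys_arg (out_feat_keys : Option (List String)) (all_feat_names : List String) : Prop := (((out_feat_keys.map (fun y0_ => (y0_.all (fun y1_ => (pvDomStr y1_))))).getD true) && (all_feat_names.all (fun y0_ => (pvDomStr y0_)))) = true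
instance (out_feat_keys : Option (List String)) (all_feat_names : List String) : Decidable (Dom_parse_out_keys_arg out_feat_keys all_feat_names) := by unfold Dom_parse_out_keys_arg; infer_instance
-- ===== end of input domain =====

-- B walks all_feat_names once, discarding each layer name from the set of pending requests and
-- stopping at the index where it empties; A scans all_feat_names per key and folds max over .index.
-- Equivalence is about the RETURN value.

-- ===== PORT A =====

-- A's normalization: '[] -> None' then default to [all_feat_names[-1]]
-- (all_feat_names[-1] raises IndexError on []; that input is excluded by Pre_, the port returns [])
def pvKeys (out_feat_keys : Option (List String)) (all_feat_names : List String) : List String :=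
  let ofk := match out_feat_keys with
    | some l => if l.length = 0 then none else some l
    | none => none
  match ofk with
  | none =>
      match PySem.List.pyGet? all_feat_names (-1) with
      | some x => [x]
      | none => []
  | some l => l

-- A's validation loop: 'for f, key in enumerate(out_feat_keys)' with the checks
-- 'key not in all_feat_names' and 'key in out_feat_keys[:f]'; the growing prefix pre is out_feat_keys[:f].
-- A raise is represented as false (those inputs are excluded by Pre_).
def pyAcheck (all_feat_names : List String) : List String → List String → Bool
  | _, [] => true
  | pre, k :: rest =>
      if ¬ (k ∈ all_feat_names) then false
      else if k ∈ pre then false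
      else pyAcheck all_feat_names (pre ++ [k]) rest

def parse_out_keys_arg (out_feat_keys : Option (List String)) (all_feat_names : List String) : List String × Int :=
  if pyAcheck all_feat_names [] (pvKeys out_feat_keys all_feat_names) then
    -- max(all_feat_names.index(key) for key in out_feat_keys); .index is total here since the check passed
    match PySem.List.max? ((pvKeys out_feat_keys all_feat_names).map (fun k => (((PySem.List.index? all_feat_names k).getD 0 : Nat) : Int))) (fun x => x) with
    | some m => (pvKeys out_feat_keys all_feat_names, m)
    | none => ([], 0)   -- max() on empty: ValueError, excluded by Pre_
  else ([], 0)          -- ValueError raised, excluded by Pre_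

-- ===== PORT B =====

-- B's normalization: 'if not out_feat_keys: out_feat_keys = [all_feat_names[-1]]'
def pvKeysB (out_feat_keys : Option (List String)) (all_feat_names : List String) : List String :=
  match out_feat_keys with
  | some (k :: rest) => k :: rest
  | _ =>
      match PySem.List.pyGet? all_feat_names (-1) with
      | some x => [x]
      | none => []      -- IndexError, excluded by Pre_

-- B's layer walk: 'for i, name in enumerate(all_feat_names): remaining.discard(name); if not remaining: break'
-- returns (the pending set after the loop, max_out_feat)
def pvFind : List String → PySem.Set String → Nat → PySem.Set String × Int
  | [], remaining, _ => (remaining, -1)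
  | name :: rest, remaining, i =>
      if PySem.Set.discard remaining name = [] then (PySem.Set.discard remaining name, (i : Int))
      else pvFind rest (PySem.Set.discard remaining name) (i + 1)

def parse_out_keys_arg_alt (out_feat_keys : Option (List String)) (all_feat_names : List String) : List String × Int :=
  let keys := pvKeysB out_feat_keys all_feat_names
  let remaining := PySem.Set.ofList keys
  if PySem.Set.len remaining ≠ PySem.List.len keys then
    ([], 0)   -- a duplicate exists, so Source B's pinpointing loop necessarily raises ValueError; excluded by Pre_
  else
    let p := pvFind all_feat_names remaining 0
    if p.1 ≠ [] then ([], 0)   -- a requested key never appears: ValueError, excluded by Pre_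
    else (keys, p.2)

-- ===== PRECONDITION & SPEC =====
-- Pre_ excludes exactly the inputs where Python A raises: an empty/None key list with empty
-- all_feat_names (IndexError), a key not among the names, or a duplicate key (ValueError).
def Pre_parse_out_keys_arg (out_feat_keys : Option (List String)) (all_feat_names : List String) : Prop :=
  (out_feat_keys.getD [] = [] → all_feat_names ≠ []) ∧
  (out_feat_keys.getD []).Nodup ∧ ∀ k ∈ out_feat_keys.getD [], k ∈ all_feat_names

instance (out_feat_keys : Option (List String)) (all_feat_names : List String) : Decidable (Pre_parse_out_keys_arg out_feat_keys all_feat_names) := by unfold Pre_parse_out_keys_arg; infer_instance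

def pvWitness_parse_out_keys_arg : Option (List String) × List String := (some ["b", "a"], ["a", "b", "c"])

def Spec_parse_out_keys_arg (out_feat_keys : Option (List String)) (all_feat_names : List String) (out : List String × Int) : Prop := out = parse_out_keys_arg_alt out_feat_keys all_feat_names
instance (out_feat_keys : Option (List String)) (all_feat_names : List String) (out : List String × Int) : Decidable (Spec_parse_out_keys_arg out_feat_keys all_feat_names out) := by unfold Spec_parse_out_keys_arg; infer_instance

-- ===== CLAIM (what is proved, stated in full; the proofs are below) =====
def Claim_equal_parse_out_keys_arg : Prop := ∀ (out_feat_keys : Option (List String)) (all_feat_names : List String), Dom_parse_out_keys_arg out_feat_keys all_feat_names → Pre_parse_out_keys_arg out_feat_keys all_feat_names → Spec_parse_out_keys_arg out_feat_keys all_feat_names (parse_out_keys_arg out_feat_keys all_feat_names)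

-- ===== LEMMAS AND PROOFS =====

-- both normalizations produce the same effective key list
theorem pvKeysB_eq (out_feat_keys : Option (List String)) (all_feat_names : List String) :
    pvKeysB out_feat_keys all_feat_names = pvKeys out_feat_keys all_feat_names := by
  match out_feat_keys with
  | none => rfl
  | some [] => rfl
  | some (k :: rest) => rfl

-- A's validation succeeds on a nodup key list all of whose keys exist
theorem pyAcheck_true (all : List String) (keys pre : List String)
    (hmem : ∀ k ∈ keys, k ∈ all) (hnd : (pre ++ keys).Nodup) :
    pyAcheck all pre keys = true := by
  induction keys generalizing pre with
  | nil => rfl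
  | cons k rest ih =>
      have hka : k ∈ all := hmem k (by simp)
      have hkpre : k ∉ pre := by
        intro h
        exact (List.disjoint_of_nodup_append hnd) h (by simp)
      rw [pyAcheck]
      simp only [hka, not_true, if_false, hkpre, if_false]
      exact ih (pre ++ [k]) (fun x hx => hmem x (by simp [hx]))
        (by simpa [List.append_assoc] using hnd)

-- B's walk: when the pending set is nonempty and covered by the remaining layers, it ends with the
-- pending set empty and max_out_feat equal to i plus the largest first-occurrence index of a pending key
theorem pvFind_spec (names : List String) : ∀ (S : PySem.Set String) (i : Nat),
    S ≠ [] → (∀ s ∈ S, s ∈ names) →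
    (pvFind names S i).1 = [] ∧
    (∃ s ∈ S, (pvFind names S i).2 = (i : Int) + (((PySem.List.index? names s).getD 0 : Nat) : Int)) ∧
    (∀ s ∈ S, (i : Int) + (((PySem.List.index? names s).getD 0 : Nat) : Int) ≤ (pvFind names S i).2) := by
  induction names with
  | nil =>
      intro S i hne hmem
      obtain ⟨s, hs⟩ := List.exists_mem_of_ne_nil S hne
      exact absurd (hmem s hs) (List.not_mem_nil)
  | cons name rest ih =>
      intro S i hne hmem
      by_cases hr : PySem.Set.discard S name = []
      · have hall : ∀ s ∈ S, s = name := by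
          intro s hs
          by_contra h
          have : s ∈ PySem.Set.discard S name := (PySem.Set.mem_discard S name s).mpr ⟨hs, h⟩
          rw [hr] at this
          exact absurd this (List.not_mem_nil)
        obtain ⟨s, hs⟩ := List.exists_mem_of_ne_nil S hne
        rw [pvFind, if_pos hr]
        refine ⟨hr, ⟨s, hs, ?_⟩, ?_⟩
        · rw [hall s hs, PySem.List.index?_cons_self]
          simp
        · intro t ht
          rw [hall t ht, PySem.List.index?_cons_self]
          simp
      · have hsub : ∀ s ∈ PySem.Set.discard S name, s ∈ rest := by
          intro s hs
          obtain ⟨hsS, hsn⟩ := (PySem.Set.mem_discard S name s).mp hs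
          have := hmem s hsS
          simp only [List.mem_cons] at this
          tauto
        obtain ⟨h1, ⟨s₀, hs₀, heq⟩, hub⟩ := ih (PySem.Set.discard S name) (i + 1) hr hsub
        obtain ⟨hs₀S, hs₀n⟩ := (PySem.Set.mem_discard S name s₀).mp hs₀
        rw [pvFind, if_neg hr]
        refine ⟨h1, ⟨s₀, hs₀S, ?_⟩, ?_⟩
        · obtain ⟨n, hn⟩ := Option.isSome_iff_exists.mp
            ((PySem.List.index?_isSome_iff rest s₀).mpr (hsub s₀ hs₀))
          rw [PySem.List.index?_cons_of_ne rest (fun h => hs₀n h.symm), hn]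
          rw [hn] at heq
          simp only [Option.map_some, Option.getD_some] at heq ⊢
          rw [heq]
          push_cast
          ring
        · intro s hs
          by_cases hsn : s = name
          · subst hsn
            rw [PySem.List.index?_cons_self]
            obtain ⟨n, hn⟩ := Option.isSome_iff_exists.mp
              ((PySem.List.index?_isSome_iff rest s₀).mpr (hsub s₀ hs₀))
            rw [hn] at heq
            simp only [Option.getD_some] at heq
            simp only [Option.getD_some]
            rw [heq]
            push_cast
            omega
          · have hsr : s ∈ PySem.Set.discard S name := (PySem.Set.mem_discard S name s).mpr ⟨hs, hsn⟩
            have := hub s hsr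
            obtain ⟨m, hm⟩ := Option.isSome_iff_exists.mp
              ((PySem.List.index?_isSome_iff rest s).mpr (hsub s hsr))
            rw [hm] at this
            rw [PySem.List.index?_cons_of_ne rest (fun h => hsn h.symm), hm]
            simp only [Option.map_some, Option.getD_some] at this ⊢
            push_cast at this ⊢
            omega

-- the core equality on the effective key list
theorem pv_main (all keys : List String) (hne : keys ≠ []) (hmem : ∀ k ∈ keys, k ∈ all) :
    (match PySem.List.max? (keys.map (fun k => (((PySem.List.index? all k).getD 0 : Nat) : Int))) (fun x => x) with
      | some m => (keys, m)
      | none => (([] : List String), (0 : Int)))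
    = (if (pvFind all keys 0).1 ≠ [] then ([], 0) else (keys, (pvFind all keys 0).2)) := by
  obtain ⟨h1, ⟨s₀, hs₀, heq⟩, hub⟩ := pvFind_spec all keys 0 hne hmem
  rw [if_neg (by simp [h1])]
  cases keys with
  | nil => exact absurd rfl hne
  | cons c t =>
      rw [List.map_cons, PySem.List.max?_id_cons]
      have hVW : List.foldl max (((PySem.List.index? all c).getD 0 : Nat) : Int)
          (t.map (fun k => (((PySem.List.index? all k).getD 0 : Nat) : Int)))
          = (pvFind all (c :: t) 0).2 := by
        apply le_antisymm
        · rcases PySem.List.foldl_max_mem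
            (t.map (fun k => (((PySem.List.index? all k).getD 0 : Nat) : Int)))
            (((PySem.List.index? all c).getD 0 : Nat) : Int) with h | h
          · rw [h]
            have := hub c (by simp)
            simpa using this
          · obtain ⟨k, hk, hfk⟩ := List.mem_map.mp h
            rw [← hfk]
            have := hub k (by simp [hk])
            simpa using this
        · have hb := PySem.List.le_foldl_max
            (t.map (fun k => (((PySem.List.index? all k).getD 0 : Nat) : Int)))
            (((PySem.List.index? all c).getD 0 : Nat) : Int)
          simp only [Nat.cast_zero, zero_add] at heq
          rw [heq]
          rcases List.mem_cons.mp hs₀ with h | h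
          · rw [h]
            exact hb.1
          · exact hb.2 _ (List.mem_map.mpr ⟨s₀, h, rfl⟩)
      rw [hVW]

-- pvKeys satisfies the hypotheses of pv_main under Pre_
theorem pvKeys_good (out_feat_keys : Option (List String)) (all : List String)
    (hpre : Pre_parse_out_keys_arg out_feat_keys all) :
    pvKeys out_feat_keys all ≠ [] ∧ (pvKeys out_feat_keys all).Nodup ∧
      ∀ k ∈ pvKeys out_feat_keys all, k ∈ all := by
  obtain ⟨hdef, hnd, hmem⟩ := hpre
  have hlast : all ≠ [] → ∃ x, PySem.List.pyGet? all (-1) = some x ∧ x ∈ all := by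
    intro h
    obtain ⟨x, hx⟩ := Option.isSome_iff_exists.mp (List.getLast?_isSome.mpr h)
    have hp : PySem.List.pyGet? all (-1) = some x := by
      rw [PySem.List.pyGet?_neg_one, hx]
    exact ⟨x, hp, PySem.List.mem_of_pyGet?_eq_some _ hp⟩
  match out_feat_keys with
  | none =>
      obtain ⟨x, hx, hxa⟩ := hlast (hdef rfl)
      simp [pvKeys, hx, hxa]
  | some [] =>
      obtain ⟨x, hx, hxa⟩ := hlast (hdef rfl)
      simp [pvKeys, hx, hxa]
  | some (a :: l) =>
      simp only [pvKeys, List.length_cons]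
      exact ⟨by simp, by simpa using hnd, by simpa using hmem⟩

-- ===== VERDICT (by name: the statement is the Claim_ definition above) =====
theorem parse_out_keys_arg_spec : Claim_equal_parse_out_keys_arg := by
  intro out_feat_keys all_feat_names _ hpre
  obtain ⟨hne, hnd, hmem⟩ := pvKeys_good out_feat_keys all_feat_names hpre
  unfold Spec_parse_out_keys_arg parse_out_keys_arg parse_out_keys_arg_alt
  simp only [pvKeysB_eq]
  rw [pyAcheck_true all_feat_names _ [] hmem (by simpa using hnd), if_pos rfl]
  rw [PySem.Set.ofList_eq_self_of_nodup _ hnd]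
  rw [if_neg (by simp [PySem.Set.len, PySem.List.len])]
  exact pv_main all_feat_names _ hne hmem
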